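-- pv_equiv track=rewrite | github.com/Et0ZheMax/UsersDash | RSSv7/RssCounterWebV7.py | _cycle_has_gather_issue
-- ===== SOURCE A (Python) =====
-- GATHER_TILES_STREAK = 3
--
-- GATHER_TILES_PATTERNS = (
--     "gather: cannot find tile",
--     "gather: cannot find level menu",
-- )
--
-- def _cycle_has_gather_issue(lines: list[str]) -> bool:
--     """Проверяет, есть ли в рамках цикла подряд >= N ошибок поиска плиток."""
--
--     streak = 0
--     for line in lines:
--         low = line.lower()
--         if any(pat in low for pat in GATHER_TILES_PATTERNS):
--             streak += 1
--             if streak >= GATHER_TILES_STREAK: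
--                 return True
--         else:
--             streak = 0
--     return False
-- ===== SOURCE B (Python) =====
-- GATHER_TILES_STREAK = 3
--
-- GATHER_TILES_PATTERNS = (
--     "gather: cannot find tile",
--     "gather: cannot find level menu",
-- )
--
-- def _cycle_has_gather_issue(lines: list[str]) -> bool:
--     """True iff some window of GATHER_TILES_STREAK consecutive lines all match."""
--     flags = [any(pat in line.lower() for pat in GATHER_TILES_PATTERNS) for line in lines]
--     return any(a and b and c for a, b, c in zip(flags, flags[1:], flags[2:]))
-- ===== Notes on version B (the rewrite author's own statement) =====
-- stated objective: idiomatic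
-- what changed: Replaced the running streak counter with reset and early return by a boolean flag list plus a zip of three shifted views, returning True iff any length-3 window is all matches.
import Mathlib
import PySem

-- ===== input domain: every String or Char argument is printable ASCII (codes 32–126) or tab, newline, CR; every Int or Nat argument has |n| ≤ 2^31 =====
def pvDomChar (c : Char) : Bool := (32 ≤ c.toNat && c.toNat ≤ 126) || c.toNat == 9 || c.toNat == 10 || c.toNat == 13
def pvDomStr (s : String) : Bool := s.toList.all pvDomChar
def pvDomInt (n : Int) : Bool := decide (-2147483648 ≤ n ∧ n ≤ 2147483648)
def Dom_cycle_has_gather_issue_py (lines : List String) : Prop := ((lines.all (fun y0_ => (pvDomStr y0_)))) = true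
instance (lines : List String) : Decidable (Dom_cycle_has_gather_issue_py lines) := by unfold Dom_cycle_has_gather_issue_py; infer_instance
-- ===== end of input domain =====

-- B replaces A's running streak counter by a flag list and a three-way zip of
-- shifted views (any all-true window of length 3); same cost, more idiomatic.

-- shared module constant GATHER_TILES_PATTERNS
def pvGatherPatterns : List String :=
  ["gather: cannot find tile", "gather: cannot find level menu"]

-- ===== PORT A =====
-- the for-loop with early return, as structural recursion over (lines, streak)
def pvGoA : List String → Nat → Bool
  | [], _ => false
  | line :: rest, streak =>
    let low := PySem.Str.lower line
    if pvGatherPatterns.any (fun pat => PySem.Str.isIn pat low) then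
      let streak' := streak + 1
      if streak' ≥ 3 then true else pvGoA rest streak'
    else pvGoA rest 0

def cycle_has_gather_issue_py (lines : List String) : Bool := pvGoA lines 0

-- ===== PORT B =====
-- any(pat in line.lower() for pat in GATHER_TILES_PATTERNS)
def pvFlag (line : String) : Bool :=
  pvGatherPatterns.any (fun pat => PySem.Str.isIn pat (PySem.Str.lower line))

def cycle_has_gather_issue_py_alt (lines : List String) : Bool :=
  let flags := lines.map pvFlag
  (((flags.zip (PySem.List.slice flags (some 1) none)).zip
      (PySem.List.slice flags (some 2) none)).any
    (fun t => t.1.1 && t.1.2 && t.2))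

-- ===== PRECONDITION & SPEC =====
def Spec_cycle_has_gather_issue_py (lines : List String) (out : Bool) : Prop := out = cycle_has_gather_issue_py_alt lines
instance (lines : List String) (out : Bool) : Decidable (Spec_cycle_has_gather_issue_py lines out) := by unfold Spec_cycle_has_gather_issue_py; infer_instance

-- ===== CLAIM (what is proved, stated in full; the proofs are below) =====
def Claim_equal_cycle_has_gather_issue_py : Prop := ∀ (lines : List String), Dom_cycle_has_gather_issue_py lines → Spec_cycle_has_gather_issue_py lines (cycle_has_gather_issue_py lines)

-- ===== LEMMAS AND PROOFS =====

-- common characterisation: some 3 consecutive elements are all true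
def pvHasRun3 : List Bool → Bool
  | a :: b :: c :: r => (a && b && c) || pvHasRun3 (b :: c :: r)
  | _ => false

theorem pvHasRun3_false_cons (xs : List Bool) :
    pvHasRun3 (false :: xs) = pvHasRun3 xs := by
  match xs with
  | [] => rfl
  | [_] => rfl
  | _ :: _ :: _ => simp [pvHasRun3]

theorem pvHasRun3_tf (xs : List Bool) :
    pvHasRun3 (true :: false :: xs) = pvHasRun3 xs := by
  cases xs with
  | nil => rfl
  | cons c r =>
    show (true && false && c || pvHasRun3 (false :: c :: r)) = _
    rw [pvHasRun3_false_cons]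
    simp

theorem pvHasRun3_ttf (xs : List Bool) :
    pvHasRun3 (true :: true :: false :: xs) = pvHasRun3 xs := by
  show (true && true && false || pvHasRun3 (true :: false :: xs)) = _
  rw [pvHasRun3_tf]
  simp

-- A-side invariant: the loop with a pending streak s ≤ 2 computes pvHasRun3
-- of the flags with s virtual true-flags prepended
theorem pvGoA_eq (lines : List String) : ∀ s : Nat, s ≤ 2 →
    pvGoA lines s = pvHasRun3 (List.replicate s true ++ lines.map pvFlag) := by
  induction lines with
  | nil =>
    intro s hs
    interval_cases s <;> rfl
  | cons line rest ih =>
    intro s hs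
    by_cases h : pvFlag line = true
    · have hflag : pvGatherPatterns.any
        (fun pat => PySem.Str.isIn pat (PySem.Str.lower line)) = true := h
      by_cases hs2 : s = 2
      · subst hs2
        simp only [pvGoA, hflag, if_true]
        simp [pvHasRun3, h]
      · have hs1 : s ≤ 1 := by omega
        have : List.replicate s true ++ (line :: rest).map pvFlag
            = List.replicate (s + 1) true ++ rest.map pvFlag := by
          simp [List.map, h, List.replicate_succ']
        rw [this, ← ih (s + 1) (by omega)]
        simp only [pvGoA, hflag, if_true]
        have : ¬ (s + 1 ≥ 3) := by omega
        simp [this]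
    · have h' : pvFlag line = false := by simpa using h
      have hflag : pvGatherPatterns.any
        (fun pat => PySem.Str.isIn pat (PySem.Str.lower line)) = false := h'
      have step : pvGoA (line :: rest) s = pvGoA rest 0 := by
        simp only [pvGoA, hflag, Bool.false_eq_true, if_false]
      rw [step, ih 0 (by omega)]
      simp only [List.map, h', List.replicate, List.nil_append]
      interval_cases s
      · simp [pvHasRun3_false_cons]
      · simp [List.replicate, pvHasRun3_tf]
      · simp [List.replicate, pvHasRun3_ttf]

-- B-side: the three-way zip-any computes pvHasRun3
theorem pvZip3_eq (flags : List Bool) :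
    (((flags.zip (flags.drop 1)).zip (flags.drop 2)).any
      (fun t => t.1.1 && t.1.2 && t.2)) = pvHasRun3 flags := by
  match flags with
  | [] => rfl
  | [_] => rfl
  | [_, _] => rfl
  | a :: b :: c :: r =>
    have := pvZip3_eq (b :: c :: r)
    simp only [List.drop, List.zip_cons_cons, List.any_cons] at this ⊢
    rw [this]
    rfl

theorem alt_eq (lines : List String) :
    cycle_has_gather_issue_py_alt lines = pvHasRun3 (lines.map pvFlag) := by
  have e : cycle_has_gather_issue_py_alt lines =
      (((lines.map pvFlag).zip (PySem.List.slice (lines.map pvFlag) (some 1) none)).zip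
        (PySem.List.slice (lines.map pvFlag) (some 2) none)).any
      (fun t => t.1.1 && t.1.2 && t.2) := rfl
  rw [e, PySem.List.slice_from_one, PySem.List.slice_from (lines.map pvFlag) (show (0:Int) ≤ (2:Int) by norm_num)]
  have h1 : (lines.map pvFlag).tail = (lines.map pvFlag).drop 1 := by simp
  have h2 : ((2:Int)).toNat = 2 := rfl
  rw [h1, h2, pvZip3_eq]

-- ===== VERDICT (by name: the statement is the Claim_ definition above) =====
theorem cycle_has_gather_issue_py_spec : Claim_equal_cycle_has_gather_issue_py := by
  intro lines _
  unfold Spec_cycle_has_gather_issue_py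
  rw [alt_eq, cycle_has_gather_issue_py, pvGoA_eq lines 0 (by omega)]
  rfl
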